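-- pv_equiv track=rewrite | github.com/sagisaa/Learning_FOLA | LatticeMinimization.py | find_minimal_partition
-- ===== SOURCE A (Python) =====
-- from typing import Dict, List, Set
--
-- def find_minimal_partition(Q: Set, H: List[List[Set]]):
--     """
--     Find the minimal partition that is consistent with the received transitions.
--
--     :param Q: the set of elements (states).
--     :param H: a list of all partitions to be consistent with.
--             each partition contains sets of elements from Q
--     :return: A minimal partition that is consistent with all partitions in H,
--             containing all elements in Q.
--     """
--     P = [Q]
--     for h in H:
--         new_P = []
--         for T in P:
--             parts_to_add = []
--             for S in h:
--                 U = T.intersection(S)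
--                 if len(U) > 0:
--                     parts_to_add.append(U)
--             if len(parts_to_add) == 0:
--                 new_P.append(T)
--             else:
--                 elements_left = set([q for q in T if not any([q in u for u in parts_to_add])])
--                 parts_to_add[0] = parts_to_add[0].union(elements_left)
--             new_P.extend(parts_to_add)
--         P = new_P
--     return P
-- ===== SOURCE B (Python) =====
-- from typing import Dict, List, Set
--
-- def find_minimal_partition(Q: Set, H: List[List[Set]]):
--     """Inverted-index bucketing: for each partition h build once a map
--     element -> indices of h's parts containing it; then split each block T
--     in ONE pass over its elements, dropping each into its parts' buckets
--     (uncovered elements into a leftover set merged with the first bucket)."""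
--     P = [Q]
--     for h in H:
--         idx = {}
--         j = 0
--         for S in h:
--             for q in S:
--                 idx.setdefault(q, []).append(j)
--             j += 1
--         new_P = []
--         for T in P:
--             buckets = [set() for _ in h]
--             leftovers = set()
--             for q in T:
--                 js = idx.get(q, [])
--                 if js:
--                     for j2 in js:
--                         buckets[j2].add(q)
--                 else:
--                     leftovers.add(q)
--             parts = [b for b in buckets if b]
--             if not parts:
--                 new_P.append(T)
--             else:
--                 parts[0] |= leftovers
--                 new_P.extend(parts)
--         P = new_P
--     return P
-- ===== Notes on version B (the rewrite author's own statement) =====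
-- stated objective: alternative
-- what changed: Per partition h, B builds ONCE an inverted index element -> indices of h's parts containing it, then splits each block in a single pass over its elements into per-part buckets plus a leftover set, instead of A's per-block loop over h's parts computing T.intersection(S) and a per-element any() scan for leftovers.
import Mathlib
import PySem

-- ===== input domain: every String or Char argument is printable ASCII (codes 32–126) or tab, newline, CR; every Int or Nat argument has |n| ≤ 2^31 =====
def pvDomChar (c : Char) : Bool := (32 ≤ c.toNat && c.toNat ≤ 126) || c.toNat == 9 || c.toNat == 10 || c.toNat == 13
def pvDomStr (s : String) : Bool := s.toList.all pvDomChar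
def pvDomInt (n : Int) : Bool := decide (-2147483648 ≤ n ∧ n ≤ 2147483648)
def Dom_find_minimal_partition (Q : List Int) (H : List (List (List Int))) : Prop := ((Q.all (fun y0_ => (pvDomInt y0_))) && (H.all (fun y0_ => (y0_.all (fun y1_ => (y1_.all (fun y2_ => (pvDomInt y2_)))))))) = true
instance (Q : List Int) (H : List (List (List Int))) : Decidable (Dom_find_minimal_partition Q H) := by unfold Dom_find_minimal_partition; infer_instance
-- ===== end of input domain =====

-- B refines each block by inverted-index bucketing: per partition h it builds once a map
-- element -> indices of h's parts containing it, then splits every block in ONE pass over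
-- its elements into buckets (objective: alternative algorithm; per-block scans over h's
-- parts are replaced by one index built per h).
-- Sets (Q, the members of H's partitions, the returned blocks) are PySem.Set values.

-- ===== PORT A =====
-- inner loop: parts_to_add accumulated over the sets S of h
def fmpPartsA (T : List Int) (h : List (List Int)) : List (List Int) :=
  h.foldl (fun ps S =>
    let U := PySem.Set.inter T (PySem.Set.ofList S)
    if 0 < U.length then ps ++ [U] else ps) []

-- body of 'for T in P'
def fmpRefineA (h : List (List Int)) (newP : List (List Int)) (T : List Int) : List (List Int) :=
  let parts := fmpPartsA T h
  if parts.length = 0 then newP ++ [T]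
  else
    let left := PySem.Set.ofList (T.filter (fun q => !(parts.any (fun u => PySem.Set.contains u q))))
    newP ++ PySem.List.pySetD parts 0 (PySem.Set.union (PySem.List.pyGetD parts 0 []) left)

def find_minimal_partition (Q : List Int) (H : List (List (List Int))) : List (List Int) :=
  H.foldl (fun P h => P.foldl (fmpRefineA h) []) [PySem.Set.ofList Q]

-- ===== PORT B =====
-- 'for S in h: for q in S: idx.setdefault(q, []).append(j); j += 1'
def fmpIndexB : List (List Int) → Nat → PySem.Dict Int (List Nat) → PySem.Dict Int (List Nat)
  | [], _, d => d
  | S :: hs, j, d => fmpIndexB hs (j + 1) (S.foldl (fun d q => d.insert q (d.getD q [] ++ [j])) d)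

-- the single pass 'for q in T' filling buckets / leftovers
def fmpBucketsB (idx : PySem.Dict Int (List Nat)) (n : Nat) (T : List Int) :
    List (List Int) × List Int :=
  T.foldl (fun st q =>
    let js := idx.getD q []
    if !js.isEmpty then
      (js.foldl (fun bs j2 => bs.set j2 (PySem.Set.add (bs.getD j2 []) q)) st.1, st.2)
    else (st.1, PySem.Set.add st.2 q)) (List.replicate n [], [])

-- body of 'for T in P' in Source B
def fmpRefineB (idx : PySem.Dict Int (List Nat)) (n : Nat) (newP : List (List Int)) (T : List Int) : List (List Int) :=
  let st := fmpBucketsB idx n T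
  let parts := st.1.filter (fun b => !b.isEmpty)
  match parts with
  | [] => newP ++ [T]
  | p0 :: rest => newP ++ (PySem.Set.union p0 st.2 :: rest)

def find_minimal_partition_alt (Q : List Int) (H : List (List (List Int))) : List (List Int) :=
  H.foldl (fun P h =>
    let idx := fmpIndexB h 0 PySem.Dict.empty
    P.foldl (fmpRefineB idx h.length) []) [PySem.Set.ofList Q]

-- ===== PRECONDITION & SPEC =====
def Spec_find_minimal_partition (Q : List Int) (H : List (List (List Int))) (out : List (List Int)) : Prop := out = find_minimal_partition_alt Q H
instance (Q : List Int) (H : List (List (List Int))) (out : List (List Int)) : Decidable (Spec_find_minimal_partition Q H out) := by unfold Spec_find_minimal_partition; infer_instance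

-- ===== CLAIM (what is proved, stated in full; the proofs are below) =====
def Claim_equal_find_minimal_partition : Prop := ∀ (Q : List Int) (H : List (List (List Int))), Dom_find_minimal_partition Q H → Spec_find_minimal_partition Q H (find_minimal_partition Q H)

-- ===== LEMMAS AND PROOFS =====

lemma fmpPartsA_eq (T : List Int) (h : List (List Int)) :
    fmpPartsA T h = (h.map (fun S => PySem.Set.inter T (PySem.Set.ofList S))).filter (fun U => !U.isEmpty) := by
  have hfun : (fun (ps : List (List Int)) S =>
      let U := PySem.Set.inter T (PySem.Set.ofList S)
      if 0 < U.length then ps ++ [U] else ps) =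
      (fun acc S => if (fun S => !(PySem.Set.inter T (PySem.Set.ofList S)).isEmpty) S = true
        then acc ++ [(fun S => PySem.Set.inter T (PySem.Set.ofList S)) S] else acc) := by
    funext ps S
    simp only [Bool.not_eq_eq_eq_not, Bool.not_true]
    by_cases hv : (PySem.Set.inter T (PySem.Set.ofList S)).length = 0
    · simp [List.length_eq_zero_iff.mp hv]
    · have hpos : 0 < (PySem.Set.inter T (PySem.Set.ofList S)).length := Nat.pos_of_ne_zero hv
      simp [hpos, List.length_eq_zero_iff.not.mp hv]
  unfold fmpPartsA
  rw [hfun, PySem.List.foldl_append_if, List.filter_map]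
  rfl

-- ---- characterisation of the inverted index ----

lemma idx_inner (S : List Int) (j : Nat) :
    ∀ (d : PySem.Dict Int (List Nat)) (q : Int) (j' : Nat),
      j' ∈ (S.foldl (fun d q => d.insert q (d.getD q [] ++ [j])) d).getD q [] ↔
        j' ∈ d.getD q [] ∨ (q ∈ S ∧ j' = j) := by
  induction S with
  | nil => simp
  | cons a S' ih =>
    intro d q j'
    simp only [List.foldl_cons]
    rw [ih]
    rw [PySem.Dict.getD_insert]
    by_cases hqa : q = a
    · subst hqa; simp; try tauto
    · simp [hqa]; try tauto

lemma idx_main (hs : List (List Int)) :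
    ∀ (j : Nat) (d : PySem.Dict Int (List Nat)) (q : Int) (j' : Nat),
      j' ∈ (fmpIndexB hs j d).getD q [] ↔
        j' ∈ d.getD q [] ∨ ∃ k, ∃ hk : k < hs.length, q ∈ hs[k] ∧ j' = j + k := by
  induction hs with
  | nil => simp [fmpIndexB]
  | cons S hs' ih =>
    intro j d q j'
    show j' ∈ (fmpIndexB hs' (j + 1) _).getD q [] ↔ _
    rw [ih, idx_inner]
    constructor
    · rintro ((h1 | ⟨hq, rfl⟩) | ⟨k, hk, hqk, rfl⟩)
      · exact Or.inl h1
      · exact Or.inr ⟨0, by simp, by simpa using hq, by omega⟩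
      · exact Or.inr ⟨k + 1, by simpa using hk, by simpa using hqk, by omega⟩
    · rintro (h1 | ⟨k, hk, hqk, rfl⟩)
      · exact Or.inl (Or.inl h1)
      · cases k with
        | zero => exact Or.inl (Or.inr ⟨by simpa using hqk, by omega⟩)
        | succ k' =>
          exact Or.inr ⟨k', by simpa using hk, by simpa using hqk, by omega⟩

lemma idx_char (h : List (List Int)) (q : Int) (j' : Nat) :
    j' ∈ (fmpIndexB h 0 PySem.Dict.empty).getD q [] ↔
      ∃ hk : j' < h.length, q ∈ h[j'] := by
  rw [idx_main]
  simp only [PySem.Dict.getD_empty, List.not_mem_nil, false_or, Nat.zero_add]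
  constructor
  · rintro ⟨k, hk, hqk, rfl⟩; exact ⟨hk, hqk⟩
  · rintro ⟨hk, hqk⟩; exact ⟨j', hk, hqk, rfl⟩

lemma idx_nonempty (h : List (List Int)) (q : Int) :
    ((fmpIndexB h 0 PySem.Dict.empty).getD q []).isEmpty = false ↔ ∃ S ∈ h, q ∈ S := by
  rw [List.isEmpty_eq_false_iff_exists_mem]
  constructor
  · rintro ⟨j', hj'⟩
    obtain ⟨hk, hqk⟩ := (idx_char h q j').mp hj'
    exact ⟨h[j'], List.getElem_mem hk, hqk⟩
  · rintro ⟨S, hS, hq⟩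
    obtain ⟨k, hk, rfl⟩ := List.getElem_of_mem hS
    exact ⟨k, (idx_char h q k).mpr ⟨hk, hq⟩⟩

-- ---- the bucket-filling pass ----

lemma bfold_length (q : Int) (js : List Nat) :
    ∀ bs : List (List Int),
      (js.foldl (fun bs j2 => bs.set j2 (PySem.Set.add (bs.getD j2 []) q)) bs).length = bs.length := by
  induction js with
  | nil => intro bs; rfl
  | cons j2 rest ih => intro bs; rw [List.foldl_cons, ih, List.length_set]

lemma bfold_getD (q : Int) (js : List Nat) :
    ∀ (bs : List (List Int)) (j : Nat), j < bs.length →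
      (js.foldl (fun bs j2 => bs.set j2 (PySem.Set.add (bs.getD j2 []) q)) bs).getD j [] =
        if j ∈ js then PySem.Set.add (bs.getD j []) q else bs.getD j [] := by
  induction js with
  | nil => intro bs j hj; simp
  | cons j2 rest ih =>
    intro bs j hj
    rw [List.foldl_cons]
    rw [ih _ j (by rw [List.length_set]; exact hj)]
    by_cases hjj : j = j2
    · subst hjj
      have hset : (bs.set j (PySem.Set.add (bs.getD j []) q)).getD j [] =
          PySem.Set.add (bs.getD j []) q := by
        rw [List.getD_eq_getElem _ _ (by rw [List.length_set]; exact hj)]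
        simp
      rw [hset]
      simp only [List.mem_cons, true_or, if_true]
      by_cases hr : j ∈ rest
      · simp only [hr, if_true]
        exact PySem.Set.add_of_mem (by simp [PySem.Set.mem_add])
      · simp [hr]
    · have hset : (bs.set j2 (PySem.Set.add (bs.getD j2 []) q)).getD j [] = bs.getD j [] := by
        rw [List.getD_eq_getElem _ _ (by rw [List.length_set]; exact hj),
            List.getElem_set_ne (fun e => hjj e.symm), ← List.getD_eq_getElem _ _ hj]
      rw [hset]
      simp [List.mem_cons, hjj]

lemma buckets_fold_length (idx : PySem.Dict Int (List Nat)) :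
    ∀ (T : List Int) (bs : List (List Int)) (ls : List Int),
      (T.foldl (fun st q =>
        let js := idx.getD q []
        if !js.isEmpty then
          (js.foldl (fun bs j2 => bs.set j2 (PySem.Set.add (bs.getD j2 []) q)) st.1, st.2)
        else (st.1, PySem.Set.add st.2 q)) (bs, ls)).1.length = bs.length := by
  intro T
  induction T with
  | nil => intro bs ls; rfl
  | cons q T' ih =>
    intro bs ls
    rw [List.foldl_cons]
    by_cases hje : (idx.getD q []).isEmpty
    · simp only [hje, Bool.not_true, Bool.false_eq_true, if_false]; exact ih bs _
    · simp only [Bool.not_eq_true'] at hje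
      simp only [hje, Bool.not_false, if_true]
      rw [ih]; exact bfold_length q _ bs

lemma buckets_fold_getD (idx : PySem.Dict Int (List Nat)) :
    ∀ (T : List Int) (bs : List (List Int)) (ls : List Int) (j : Nat), j < bs.length →
      ((T.foldl (fun st q =>
        let js := idx.getD q []
        if !js.isEmpty then
          (js.foldl (fun bs j2 => bs.set j2 (PySem.Set.add (bs.getD j2 []) q)) st.1, st.2)
        else (st.1, PySem.Set.add st.2 q)) (bs, ls)).1).getD j [] =
        T.foldl (fun b q => if j ∈ idx.getD q [] then PySem.Set.add b q else b) (bs.getD j []) := by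
  intro T
  induction T with
  | nil => intro bs ls j hj; rfl
  | cons q T' ih =>
    intro bs ls j hj
    rw [List.foldl_cons, List.foldl_cons]
    by_cases hje : (idx.getD q []).isEmpty
    · simp only [hje, Bool.not_true, Bool.false_eq_true, if_false]
      rw [ih bs _ j hj]
      have : j ∉ idx.getD q [] := by
        rw [List.isEmpty_iff] at hje; rw [hje]; exact List.not_mem_nil
      rw [if_neg this]
    · simp only [Bool.not_eq_true'] at hje
      simp only [hje, Bool.not_false, if_true]
      rw [ih _ _ j (by rw [bfold_length]; exact hj), bfold_getD q _ bs j hj]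

lemma buckets_fold_left (idx : PySem.Dict Int (List Nat)) :
    ∀ (T : List Int) (bs : List (List Int)) (ls : List Int),
      (T.foldl (fun st q =>
        let js := idx.getD q []
        if !js.isEmpty then
          (js.foldl (fun bs j2 => bs.set j2 (PySem.Set.add (bs.getD j2 []) q)) st.1, st.2)
        else (st.1, PySem.Set.add st.2 q)) (bs, ls)).2 =
        T.foldl (fun l q => if (idx.getD q []).isEmpty then PySem.Set.add l q else l) ls := by
  intro T
  induction T with
  | nil => intro bs ls; rfl
  | cons q T' ih =>
    intro bs ls
    rw [List.foldl_cons, List.foldl_cons]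
    by_cases hje : (idx.getD q []).isEmpty
    · simp only [hje, Bool.not_true, if_false, if_true]
      exact ih bs _
    · simp only [Bool.not_eq_true'] at hje
      simp only [hje, Bool.not_false, if_true]
      exact ih _ ls

lemma fold_add_filter (p : Int → Prop) [DecidablePred p] :
    ∀ (T b : List Int), T.Nodup → (∀ q ∈ T, q ∉ b) →
      T.foldl (fun b q => if p q then PySem.Set.add b q else b) b = b ++ T.filter (fun q => decide (p q)) := by
  intro T
  induction T with
  | nil => intro b _ _; simp
  | cons q T' ih =>
    intro b hnd hdisj
    rw [List.foldl_cons, List.filter_cons]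
    by_cases hp : p q
    · rw [if_pos hp]
      rw [PySem.Set.add_of_not_mem (hdisj q (by simp))]
      rw [ih (b ++ [q]) hnd.of_cons]
      · simp [hp]
      · intro x hx
        rw [List.mem_append]
        rintro (h1 | h2)
        · exact hdisj x (by simp [hx]) h1
        · rw [List.mem_singleton] at h2
          exact (List.nodup_cons.mp hnd).1 (h2 ▸ hx)
    · rw [if_neg hp, ih b hnd.of_cons (fun x hx => hdisj x (by simp [hx]))]
      simp [hp]

-- the buckets list equals A's list of intersections, pointwise
lemma buckets_eq_inters (h : List (List Int)) (T : List Int) (hT : T.Nodup) :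
    (fmpBucketsB (fmpIndexB h 0 PySem.Dict.empty) h.length T).1 =
      h.map (fun S => PySem.Set.inter T (PySem.Set.ofList S)) := by
  apply List.ext_getElem
  · rw [show (fmpBucketsB (fmpIndexB h 0 PySem.Dict.empty) h.length T).1.length =
        (List.replicate h.length ([] : List Int)).length from buckets_fold_length _ T _ []]
    simp
  · intro j hj1 hj2
    have hjn : j < h.length := by simpa using hj2
    have hlen : (fmpBucketsB (fmpIndexB h 0 PySem.Dict.empty) h.length T).1.length = h.length := by
      rw [show (fmpBucketsB (fmpIndexB h 0 PySem.Dict.empty) h.length T).1.length =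
          (List.replicate h.length ([] : List Int)).length from buckets_fold_length _ T _ []]
      simp
    rw [← List.getD_eq_getElem _ [] hj1]
    unfold fmpBucketsB
    rw [buckets_fold_getD _ T _ [] j (by simp [hjn])]
    rw [List.getD_eq_getElem _ [] (by simp [hjn] : j < (List.replicate h.length ([] : List Int)).length)]
    rw [List.getElem_replicate]
    rw [fold_add_filter (fun q => j ∈ (fmpIndexB h 0 PySem.Dict.empty).getD q []) T [] hT (by simp)]
    rw [List.nil_append, List.getElem_map]
    show _ = T.filter (fun x => PySem.Set.contains (PySem.Set.ofList h[j]) x)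
    apply List.filter_congr
    intro q _
    rw [Bool.eq_iff_iff, decide_eq_true_iff, PySem.Set.contains_iff, PySem.Set.mem_ofList]
    rw [idx_char]
    exact ⟨fun ⟨_, hq⟩ => hq, fun hq => ⟨hjn, hq⟩⟩

-- the leftover set equals A's elements_left
lemma leftovers_eq (h : List (List Int)) (T : List Int) (hT : T.Nodup) :
    (fmpBucketsB (fmpIndexB h 0 PySem.Dict.empty) h.length T).2 =
      T.filter (fun q => ((fmpIndexB h 0 PySem.Dict.empty).getD q []).isEmpty) := by
  unfold fmpBucketsB
  rw [buckets_fold_left _ T _ []]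
  rw [fold_add_filter (fun q => ((fmpIndexB h 0 PySem.Dict.empty).getD q []).isEmpty = true) T [] hT (by simp)]
  rw [List.nil_append]
  apply List.filter_congr
  intro q _
  rw [Bool.eq_iff_iff, decide_eq_true_iff, List.isEmpty_iff]

lemma fmpRefine_eq (h : List (List Int)) (newP : List (List Int)) (T : List Int) (hT : T.Nodup) :
    fmpRefineA h newP T = fmpRefineB (fmpIndexB h 0 PySem.Dict.empty) h.length newP T := by
  have hleft : (fmpBucketsB (fmpIndexB h 0 PySem.Dict.empty) h.length T).2 =
      PySem.Set.ofList (T.filter (fun q => !((fmpPartsA T h).any (fun u => PySem.Set.contains u q)))) := by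
    rw [leftovers_eq h T hT]
    rw [PySem.Set.ofList_eq_self_of_nodup _ (hT.filter _)]
    apply List.filter_congr
    intro q hq
    rw [Bool.eq_iff_iff]
    simp only [List.isEmpty_iff, Bool.not_eq_eq_eq_not, Bool.not_true, List.any_eq_false]
    constructor
    · intro hnil u hu
      rw [fmpPartsA_eq] at hu
      obtain ⟨S, hS, rfl⟩ := List.mem_map.mp (List.mem_of_mem_filter hu)
      rw [Bool.not_eq_true, ← Bool.not_eq_true, PySem.Set.contains_iff]
      intro hmem
      obtain ⟨hqT, hqS⟩ := by
        simpa [PySem.Set.inter, PySem.Set.mem_ofList] using (List.mem_filter.mp hmem)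
      have : ((fmpIndexB h 0 PySem.Dict.empty).getD q []).isEmpty = false :=
        (idx_nonempty h q).mpr ⟨S, hS, hqS⟩
      rw [hnil] at this; simp at this
    · intro hall
      by_contra hne
      have : ((fmpIndexB h 0 PySem.Dict.empty).getD q []).isEmpty = false := by
        cases hx : ((fmpIndexB h 0 PySem.Dict.empty).getD q []).isEmpty
        · rfl
        · rw [List.isEmpty_iff] at hx; exact absurd hx hne
      obtain ⟨S, hS, hqS⟩ := (idx_nonempty h q).mp this
      have hu : PySem.Set.inter T (PySem.Set.ofList S) ∈ fmpPartsA T h := by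
        rw [fmpPartsA_eq]
        apply List.mem_filter.mpr
        refine ⟨List.mem_map.mpr ⟨S, hS, rfl⟩, ?_⟩
        rw [Bool.not_eq_eq_eq_not, Bool.not_true, List.isEmpty_eq_false_iff_exists_mem]
        exact ⟨q, List.mem_filter.mpr ⟨hq, by simp [PySem.Set.mem_ofList, hqS]⟩⟩
      have := hall _ hu
      rw [Bool.not_eq_true, ← Bool.not_eq_true, PySem.Set.contains_iff] at this
      exact this (List.mem_filter.mpr ⟨hq, by simp [PySem.Set.mem_ofList, hqS]⟩)
  simp only [fmpRefineA, fmpRefineB]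
  rw [hleft, buckets_eq_inters h T hT, ← fmpPartsA_eq]
  cases hpp : fmpPartsA T h with
  | nil => simp
  | cons p0 rest =>
    simp only [List.length_cons, Nat.succ_ne_zero, if_false]
    have hget : PySem.List.pyGetD (p0 :: rest) 0 ([] : List Int) = p0 := by
      simp [PySem.List.pyGetD, PySem.List.pyGet?, PySem.List.pyIdx?]
    have hset : ∀ v, PySem.List.pySetD (p0 :: rest) 0 v = v :: rest := by
      intro v; simp [PySem.List.pySetD, PySem.List.pySet?, PySem.List.pyIdx?]
    rw [hget, hset]

lemma fmpRefineA_nodup (h : List (List Int)) (newP : List (List Int)) (T : List Int)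
    (hT : T.Nodup) (hP : ∀ x ∈ newP, x.Nodup) :
    ∀ x ∈ fmpRefineA h newP T, x.Nodup := by
  have hparts : ∀ u ∈ fmpPartsA T h, u.Nodup := by
    rw [fmpPartsA_eq]
    intro u hu
    obtain ⟨S, -, rfl⟩ := List.mem_map.mp (List.mem_of_mem_filter hu)
    exact PySem.Set.nodup_inter _ _ hT
  cases hpp : fmpPartsA T h with
  | nil =>
    intro x hx
    simp only [fmpRefineA, hpp] at hx
    simp at hx
    rcases hx with h1 | rfl
    · exact hP x h1
    · exact hT
  | cons p0 rest =>
    intro x hx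
    simp only [fmpRefineA, hpp] at hx
    rw [if_neg (by simp)] at hx
    have hset : ∀ v : List Int, PySem.List.pySetD (p0 :: rest) 0 v = v :: rest := by
      intro v; simp [PySem.List.pySetD, PySem.List.pySet?, PySem.List.pyIdx?]
    rw [hset] at hx
    rcases List.mem_append.mp hx with h1 | h1
    · exact hP x h1
    · rcases List.mem_cons.mp h1 with rfl | h2
      · exact PySem.Set.nodup_union _ _ (hparts _ (by rw [hpp]; simp))
      · exact hparts x (by rw [hpp]; simp [h2])

lemma foldlRefine_eq (h : List (List Int)) :
    ∀ (P newP : List (List Int)), (∀ T ∈ P, T.Nodup) →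
      P.foldl (fmpRefineA h) newP = P.foldl (fmpRefineB (fmpIndexB h 0 PySem.Dict.empty) h.length) newP := by
  intro P
  induction P with
  | nil => intro newP _; rfl
  | cons T Ps ih =>
    intro newP hN
    simp only [List.foldl_cons]
    rw [← fmpRefine_eq h newP T (hN T (by simp))]
    exact ih _ (fun x hx => hN x (by simp [hx]))

lemma foldlRefine_nodup (h : List (List Int)) :
    ∀ (P newP : List (List Int)), (∀ T ∈ P, T.Nodup) → (∀ x ∈ newP, x.Nodup) →
      ∀ x ∈ P.foldl (fmpRefineA h) newP, x.Nodup := by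
  intro P
  induction P with
  | nil => intro newP _ hN; exact hN
  | cons T Ps ih =>
    intro newP hP hN
    simp only [List.foldl_cons]
    exact ih _ (fun x hx => hP x (by simp [hx]))
      (fmpRefineA_nodup h newP T (hP T (by simp)) hN)

-- ===== VERDICT (by name: the statement is the Claim_ definition above) =====
theorem find_minimal_partition_spec : Claim_equal_find_minimal_partition := by
  intro Q H hdom
  clear hdom
  unfold Spec_find_minimal_partition find_minimal_partition find_minimal_partition_alt
  have : ∀ (P : List (List Int)), (∀ T ∈ P, T.Nodup) →
      H.foldl (fun P h => P.foldl (fmpRefineA h) []) P =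
      H.foldl (fun P h =>
        let idx := fmpIndexB h 0 PySem.Dict.empty
        P.foldl (fmpRefineB idx h.length) []) P := by
    induction H with
    | nil => intro P _; rfl
    | cons h Hs ih =>
      intro P hP
      simp only [List.foldl_cons]
      rw [← foldlRefine_eq h P [] hP]
      exact ih (P.foldl (fmpRefineA h) []) (foldlRefine_nodup h P [] hP (by simp))
  exact this [PySem.Set.ofList Q] (by simp [PySem.Set.nodup_ofList Q])
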